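-- pv_equiv track=rewrite | github.com/pavel-paulau/moveit | flow.py | estimate_concurrency
-- ===== SOURCE A (Python) =====
-- from collections import defaultdict, OrderedDict
--
-- def estimate_concurrency(movements):
--     timings = defaultdict(list)
--     movements_per_dest = defaultdict(int)
--     for dest_node, vbuckets in movements.items():
--         for vbucket, ((start, src_node), (end, _)) in vbuckets.items():
--             timings[dest_node].append((vbucket, src_node, start, end))
--             if src_node != dest_node:
--                 movements_per_dest[dest_node] += 1
--
--     concurrency_per_dest = dict()
--     for dest_node, vbuckets in movements.items():
--         max_concurrency = 0
--         for vbucket, ((start, src_node), (end, _)) in vbuckets.items():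
--             concurrency = 0
--             for _vbucket, _src_node, _start, _end in timings[dest_node]:
--                 if vbucket != _vbucket:
--                     if src_node == _src_node and src_node != dest_node:
--                         if _start < start < _end or _start < end < _end:
--                             concurrency += 1
--             max_concurrency = max(max_concurrency, concurrency)
--         concurrency_per_dest[dest_node] = max_concurrency
--
--     return concurrency_per_dest, movements_per_dest
-- ===== SOURCE B (Python) =====
-- def estimate_concurrency(movements):
--     concurrency_per_dest = {}
--     movements_per_dest = {}
--     for dest_node, vbuckets in movements.items():
--         groups = {}
--         cross = 0
--         for vbucket, ((start, src_node), (end, _)) in vbuckets.items():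
--             if src_node != dest_node:
--                 cross += 1
--                 groups.setdefault(src_node, []).append((vbucket, start, end))
--         max_concurrency = 0
--         for vbucket, ((start, src_node), (end, _)) in vbuckets.items():
--             if src_node == dest_node:
--                 continue
--             concurrency = sum(1 for _vbucket, _start, _end in groups[src_node]
--                               if vbucket != _vbucket
--                               and (_start < start < _end or _start < end < _end))
--             max_concurrency = max(max_concurrency, concurrency)
--         concurrency_per_dest[dest_node] = max_concurrency
--         if cross:
--             movements_per_dest[dest_node] = cross
--     return concurrency_per_dest, movements_per_dest
-- ===== Notes on version B (the rewrite author's own statement) =====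
-- stated objective: alternative
-- what changed: B replaces A's two-phase scheme (build a global per-destination timings list, then for every movement rescan the destination's whole timings list filtering on vbucket/source/destination) with a single pass per destination that buckets movements by source node once, counts cross-node movements in the same pass, and compares each movement only against its own same-source bucket.
import Mathlib
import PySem

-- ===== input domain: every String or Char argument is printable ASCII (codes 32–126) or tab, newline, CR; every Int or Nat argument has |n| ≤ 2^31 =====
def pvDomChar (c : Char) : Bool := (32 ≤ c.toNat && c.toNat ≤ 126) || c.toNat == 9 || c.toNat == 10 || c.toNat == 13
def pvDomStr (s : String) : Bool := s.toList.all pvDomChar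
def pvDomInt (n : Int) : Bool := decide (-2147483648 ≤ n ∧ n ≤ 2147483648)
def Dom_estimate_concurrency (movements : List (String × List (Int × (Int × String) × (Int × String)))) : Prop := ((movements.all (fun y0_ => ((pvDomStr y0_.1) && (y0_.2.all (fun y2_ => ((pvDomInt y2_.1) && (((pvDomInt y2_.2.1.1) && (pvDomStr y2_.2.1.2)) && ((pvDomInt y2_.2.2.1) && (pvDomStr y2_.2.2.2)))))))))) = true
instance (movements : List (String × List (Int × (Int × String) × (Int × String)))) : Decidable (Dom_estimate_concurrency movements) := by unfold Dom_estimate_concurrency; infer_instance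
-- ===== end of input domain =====

-- B groups each destination's movements by source node once, so the inner scan runs only over the
-- same-source group instead of all of the destination's movements (alternative decomposition).
-- Return-value equivalence on association lists with duplicate-free dict keys.

-- ===== PORT A =====
-- timings[dest_node].append((vbucket, src_node, start, end))
def aTimStep (dest : String) (t : PySem.Dict String (List (Int × String × Int × Int)))
    (m : Int × (Int × String) × (Int × String)) : PySem.Dict String (List (Int × String × Int × Int)) :=
  t.modify dest [] (· ++ [(m.1, m.2.1.2, m.2.1.1, m.2.2.1)])

-- if src_node != dest_node: movements_per_dest[dest_node] += 1
def aMpdStep (dest : String) (d : PySem.Dict String Int)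
    (m : Int × (Int × String) × (Int × String)) : PySem.Dict String Int :=
  if m.2.1.2 ≠ dest then d.modify dest 0 (· + 1) else d

-- the innermost loop: concurrency for one vbucket m against the timings list
def aConc (dest : String) (m : Int × (Int × String) × (Int × String))
    (ts : List (Int × String × Int × Int)) : Int :=
  ts.foldl (fun c t =>
    if m.1 ≠ t.1 then
      if m.2.1.2 = t.2.1 ∧ m.2.1.2 ≠ dest then
        if (t.2.2.1 < m.2.1.1 ∧ m.2.1.1 < t.2.2.2) ∨ (t.2.2.1 < m.2.2.1 ∧ m.2.2.1 < t.2.2.2) then c + 1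
        else c
      else c
    else c) 0

def estimate_concurrency (movements : List (String × List (Int × (Int × String) × (Int × String)))) :
    (List (String × Int)) × (List (String × Int)) :=
  let st := movements.foldl
    (fun st dv => dv.2.foldl (fun st m => (aTimStep dv.1 st.1 m, aMpdStep dv.1 st.2 m)) st)
    (PySem.Dict.empty, PySem.Dict.empty)
  let cpd := movements.foldl
    (fun cpd dv =>
      cpd.insert dv.1 (dv.2.foldl (fun mc m => max mc (aConc dv.1 m (st.1.getD dv.1 []))) 0))
    PySem.Dict.empty
  (cpd.items, st.2.items)

-- ===== PORT B =====
-- groups.setdefault(src_node, []).append((vbucket, start, end)); cross += 1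
def bGroupStep (dest : String)
    (gc : PySem.Dict String (List (Int × Int × Int)) × Int)
    (m : Int × (Int × String) × (Int × String)) : PySem.Dict String (List (Int × Int × Int)) × Int :=
  if m.2.1.2 ≠ dest then (gc.1.modify m.2.1.2 [] (· ++ [(m.1, m.2.1.1, m.2.2.1)]), gc.2 + 1) else gc

-- sum(1 for _vbucket, _start, _end in group if ...)
def bConc (m : Int × (Int × String) × (Int × String)) (g : List (Int × Int × Int)) : Int :=
  (g.countP (fun t => decide (m.1 ≠ t.1 ∧
    ((t.2.1 < m.2.1.1 ∧ m.2.1.1 < t.2.2) ∨ (t.2.1 < m.2.2.1 ∧ m.2.2.1 < t.2.2)))) : Int)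

-- if src_node == dest_node: continue; max_concurrency = max(max_concurrency, concurrency)
def bMaxStep (dest : String) (groups : PySem.Dict String (List (Int × Int × Int)))
    (mc : Int) (m : Int × (Int × String) × (Int × String)) : Int :=
  if m.2.1.2 = dest then mc else max mc (bConc m (groups.getD m.2.1.2 []))

-- one iteration of B's single outer loop: per-destination grouping, then the maximum within groups
def bDest (dest : String) (vbs : List (Int × (Int × String) × (Int × String)))
    (acc : PySem.Dict String Int × PySem.Dict String Int) :
    PySem.Dict String Int × PySem.Dict String Int :=
  let gc := vbs.foldl (bGroupStep dest) (PySem.Dict.empty, 0)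
  let mc := vbs.foldl (bMaxStep dest gc.1) 0
  (acc.1.insert dest mc, if gc.2 ≠ 0 then acc.2.insert dest gc.2 else acc.2)

def estimate_concurrency_alt (movements : List (String × List (Int × (Int × String) × (Int × String)))) :
    (List (String × Int)) × (List (String × Int)) :=
  let res := movements.foldl (fun acc dv => bDest dv.1 dv.2 acc)
    (PySem.Dict.empty, PySem.Dict.empty)
  (res.1.items, res.2.items)

-- ===== PRECONDITION & SPEC =====
-- Pre_ excludes association lists with a duplicate destination key, or a duplicate vbucket key inside
-- one destination: the Python takes dicts, which cannot hold duplicate keys, so such lists represent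
-- no input the Python function is ever called on.
def Pre_estimate_concurrency (movements : List (String × List (Int × (Int × String) × (Int × String)))) : Prop :=
  (movements.map (·.1)).Nodup ∧ ∀ dv ∈ movements, (dv.2.map (·.1)).Nodup
instance (movements : List (String × List (Int × (Int × String) × (Int × String)))) : Decidable (Pre_estimate_concurrency movements) := by unfold Pre_estimate_concurrency; infer_instance

def pvWitness_estimate_concurrency : (List (String × List (Int × (Int × String) × (Int × String)))) :=
  [("a", [(0, ((0, "b"), (5, "x"))), (1, ((1, "b"), (4, "x")))])]

def Spec_estimate_concurrency (movements : List (String × List (Int × (Int × String) × (Int × String)))) (out : (List (String × Int)) × (List (String × Int))) : Prop := out = estimate_concurrency_alt movements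
instance (movements : List (String × List (Int × (Int × String) × (Int × String)))) (out : (List (String × Int)) × (List (String × Int))) : Decidable (Spec_estimate_concurrency movements out) := by unfold Spec_estimate_concurrency; infer_instance

-- ===== CLAIM (what is proved, stated in full; the proofs are below) =====
def Claim_equal_estimate_concurrency : Prop := ∀ (movements : List (String × List (Int × (Int × String) × (Int × String)))), Dom_estimate_concurrency movements → Pre_estimate_concurrency movements → Spec_estimate_concurrency movements (estimate_concurrency movements)

-- ===== LEMMAS AND PROOFS =====

-- the tuple A appends to timings[dest]
def aTup (m : Int × (Int × String) × (Int × String)) : Int × String × Int × Int :=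
  (m.1, m.2.1.2, m.2.1.1, m.2.2.1)

-- the tuple B appends to its per-source group
def bTup (m : Int × (Int × String) × (Int × String)) : Int × Int × Int :=
  (m.1, m.2.1.1, m.2.2.1)

-- A's phase-1 fold splits into a timings fold and a movements_per_dest fold
lemma phase1_split (movs : List (String × List (Int × (Int × String) × (Int × String))))
    (t0 : PySem.Dict String (List (Int × String × Int × Int))) (m0 : PySem.Dict String Int) :
    movs.foldl (fun st dv => dv.2.foldl (fun st m => (aTimStep dv.1 st.1 m, aMpdStep dv.1 st.2 m)) st) (t0, m0)
      = (movs.foldl (fun t dv => dv.2.foldl (aTimStep dv.1) t) t0,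
         movs.foldl (fun d dv => dv.2.foldl (aMpdStep dv.1) d) m0) := by
  induction movs generalizing t0 m0 with
  | nil => rfl
  | cons dv rest ih =>
    simp only [List.foldl_cons]
    rw [PySem.List.foldl_prod_mk (f := fun t m => aTimStep dv.1 t m)
        (g := fun d m => aMpdStep dv.1 d m), ih]

-- value of the timings dict at any key
lemma timings_getD (movs : List (String × List (Int × (Int × String) × (Int × String))))
    (t0 : PySem.Dict String (List (Int × String × Int × Int))) (k : String) :
    (movs.foldl (fun t dv => dv.2.foldl (aTimStep dv.1) t) t0).getD k []
      = t0.getD k [] ++ (movs.filter (fun dv => dv.1 == k)).flatMap (fun dv => dv.2.map aTup) := by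
  induction movs generalizing t0 with
  | nil => simp
  | cons dv rest ih =>
    have hinner : ∀ (t : PySem.Dict String (List (Int × String × Int × Int))),
        (dv.2.foldl (aTimStep dv.1) t).getD k []
          = t.getD k [] ++ (if dv.1 == k then dv.2.map aTup else []) := by
      intro t
      have h1 : dv.2.foldl (aTimStep dv.1) t
          = ((dv.2.map (fun m => (dv.1, aTup m))).foldl
              (fun d p => d.modify p.1 [] (· ++ [p.2])) t) := by
        rw [List.foldl_map]; rfl
      rw [h1, PySem.Dict.getD_foldl_modify_append, List.filter_map]
      by_cases hk : dv.1 == k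
      · simp [hk, Function.comp_def, List.map_map]
      · simp [hk, Function.comp_def]
    simp only [List.foldl_cons, List.filter_cons]
    rw [ih, hinner]
    by_cases hk : dv.1 == k
    · simp [hk, List.append_assoc]
    · simp [hk]

lemma filter_key_of_nodup (movs : List (String × List (Int × (Int × String) × (Int × String))))
    (k : String) (vbs : List (Int × (Int × String) × (Int × String)))
    (hnd : (movs.map (·.1)).Nodup) (hmem : (k, vbs) ∈ movs) :
    movs.filter (fun dv => dv.1 == k) = [(k, vbs)] := by
  induction movs with
  | nil => simp at hmem
  | cons dv rest ih =>
    simp only [List.map_cons, List.nodup_cons] at hnd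
    rcases List.mem_cons.mp hmem with h | h
    · subst h
      simp only [List.filter_cons, beq_self_eq_true, if_pos]
      simp only [List.cons.injEq, true_and]
      apply List.filter_eq_nil_iff.mpr
      intro p hp
      simp only [beq_iff_eq]
      intro hpk
      exact hnd.1 (hpk ▸ List.mem_map_of_mem (f := fun x => x.1) hp)
    · have hne : dv.1 ≠ k := by
        intro he
        apply hnd.1
        have hm := List.mem_map_of_mem (f := fun x => x.1) h
        simpa [he] using hm
      simp only [List.filter_cons, beq_iff_eq, hne]
      rw [if_neg (by simpa using hne)]
      exact ih hnd.2 h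

-- B's per-destination grouping fold, split and evaluated
lemma group_split (dest : String) (vbs : List (Int × (Int × String) × (Int × String))) :
    vbs.foldl (bGroupStep dest) (PySem.Dict.empty, 0)
      = (vbs.foldl (fun g m => if m.2.1.2 ≠ dest then g.modify m.2.1.2 [] (· ++ [bTup m]) else g) PySem.Dict.empty,
         (vbs.countP (fun m => decide (m.2.1.2 ≠ dest)) : Int)) := by
  have hstep : ∀ (gc : PySem.Dict String (List (Int × Int × Int)) × Int),
      ∀ m ∈ vbs, bGroupStep dest gc m
        = (if m.2.1.2 ≠ dest then gc.1.modify m.2.1.2 [] (· ++ [bTup m]) else gc.1,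
           if m.2.1.2 ≠ dest then gc.2 + 1 else gc.2) := by
    intro gc m _
    by_cases h : m.2.1.2 ≠ dest <;> simp [bGroupStep, bTup, h]
  rw [PySem.List.foldl_congr_mem _ _ _ _ hstep,
    PySem.List.foldl_prod_mk
      (f := fun (g : PySem.Dict String (List (Int × Int × Int))) m =>
        if m.2.1.2 ≠ dest then g.modify m.2.1.2 [] (· ++ [bTup m]) else g)
      (g := fun (n : Int) m => if m.2.1.2 ≠ dest then n + 1 else n)]
  rw [PySem.List.foldl_ite_add_one (p := fun (m : Int × (Int × String) × (Int × String)) => m.2.1.2 ≠ dest)]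
  simp

lemma group_getD_aux (dest : String) (vbs : List (Int × (Int × String) × (Int × String))) (s : String)
    (g : PySem.Dict String (List (Int × Int × Int))) :
    (vbs.foldl (fun g m => if m.2.1.2 ≠ dest then g.modify m.2.1.2 [] (· ++ [bTup m]) else g) g).getD s []
      = g.getD s [] ++ ((vbs.filter (fun m => decide (m.2.1.2 ≠ dest))).filter (fun m => m.2.1.2 == s)).map bTup := by
  induction vbs generalizing g with
  | nil => simp
  | cons x rest ih =>
    simp only [List.foldl_cons]
    by_cases h : x.2.1.2 ≠ dest
    · rw [if_pos h, ih, PySem.Dict.getD_modify]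
      by_cases hs : s = x.2.1.2
      · subst hs
        rw [if_pos rfl]
        simp [h, List.append_assoc]
      · rw [if_neg hs]
        have hs' : ¬ (x.2.1.2 = s) := fun he => hs he.symm
        simp [h, hs']
    · rw [if_neg h, ih]
      simp [h]

lemma group_getD (dest : String) (vbs : List (Int × (Int × String) × (Int × String))) (s : String) :
    (vbs.foldl (fun g m => if m.2.1.2 ≠ dest then g.modify m.2.1.2 [] (· ++ [bTup m]) else g)
        (PySem.Dict.empty : PySem.Dict String (List (Int × Int × Int)))).getD s []
      = ((vbs.filter (fun m => decide (m.2.1.2 ≠ dest))).filter (fun m => m.2.1.2 == s)).map bTup := by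
  rw [group_getD_aux]
  simp

-- pointwise: A's inner count over the timings list equals B's count over the source group
lemma conc_eq (dest : String) (vbs : List (Int × (Int × String) × (Int × String)))
    (m : Int × (Int × String) × (Int × String)) :
    aConc dest m (vbs.map aTup)
      = if m.2.1.2 = dest then 0
        else bConc m (((vbs.filter (fun x => decide (x.2.1.2 ≠ dest))).filter (fun x => x.2.1.2 == m.2.1.2)).map bTup) := by
  unfold aConc
  rw [List.foldl_map]
  have hstep : ∀ (c : Int), ∀ x ∈ vbs,
      (if m.1 ≠ (aTup x).1 then
        if m.2.1.2 = (aTup x).2.1 ∧ m.2.1.2 ≠ dest then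
          if ((aTup x).2.2.1 < m.2.1.1 ∧ m.2.1.1 < (aTup x).2.2.2) ∨
             ((aTup x).2.2.1 < m.2.2.1 ∧ m.2.2.1 < (aTup x).2.2.2) then c + 1
          else c
        else c
      else c)
      = if (m.1 ≠ x.1 ∧ (m.2.1.2 = x.2.1.2 ∧ m.2.1.2 ≠ dest) ∧
            ((x.2.1.1 < m.2.1.1 ∧ m.2.1.1 < x.2.2.1) ∨ (x.2.1.1 < m.2.2.1 ∧ m.2.2.1 < x.2.2.1)))
        then c + 1 else c := by
    intro c x _
    simp only [aTup]
    split_ifs with h1 h2 h3 h4 h4 h4 h4 <;> first | rfl | (exfalso; tauto)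
  rw [PySem.List.foldl_congr_mem _ _ _ _ hstep, PySem.List.foldl_ite_add_one]
  simp only [zero_add]
  by_cases hsd : m.2.1.2 = dest
  · rw [if_pos hsd]
    have h0 : vbs.countP (fun x => decide (m.1 ≠ x.1 ∧ (m.2.1.2 = x.2.1.2 ∧ m.2.1.2 ≠ dest) ∧
        ((x.2.1.1 < m.2.1.1 ∧ m.2.1.1 < x.2.2.1) ∨ (x.2.1.1 < m.2.2.1 ∧ m.2.2.1 < x.2.2.1)))) = 0 := by
      apply List.countP_eq_zero.mpr
      intro x _
      simp [hsd]
    rw [h0]; rfl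
  · rw [if_neg hsd]
    unfold bConc
    rw [List.countP_map, List.countP_filter, List.countP_filter]
    congr 1
    apply List.countP_congr
    intro x _
    simp only [Function.comp_def, bTup, Bool.and_eq_true, decide_eq_true_eq, beq_iff_eq,
      ne_eq, decide_not, Bool.not_eq_eq_eq_not, Bool.not_true, decide_eq_false_iff_not]
    constructor
    · rintro ⟨h1, ⟨h2a, _⟩, h3⟩
      exact ⟨⟨⟨h1, h3⟩, h2a.symm⟩, fun he => hsd (h2a.symm ▸ he : m.2.1.2 = dest)⟩
    · rintro ⟨⟨⟨h1, h3⟩, h2a⟩, _⟩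
      exact ⟨h1, ⟨h2a.symm, hsd⟩, h3⟩

-- running max over the same list, with A's skip-as-zero and B's explicit skip
lemma max_fold_eq (dest : String) (vbs : List (Int × (Int × String) × (Int × String)))
    (f : Int × (Int × String) × (Int × String) → Int)
    (g : Int × (Int × String) × (Int × String) → Int)
    (h : ∀ m ∈ vbs, f m = if m.2.1.2 = dest then 0 else g m)
    (init : Int) (hinit : 0 ≤ init) :
    vbs.foldl (fun mc m => max mc (f m)) init
      = vbs.foldl (fun mc m => if m.2.1.2 = dest then mc else max mc (g m)) init := by
  induction vbs generalizing init with
  | nil => rfl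
  | cons m rest ih =>
    simp only [List.foldl_cons]
    have hm := h m (List.mem_cons_self ..)
    by_cases hd : m.2.1.2 = dest
    · rw [if_pos hd] at hm
      rw [hm, if_pos hd, max_eq_left hinit]
      exact ih (fun x hx => h x (List.mem_cons_of_mem _ hx)) init hinit
    · rw [if_neg hd] at hm
      rw [hm, if_neg hd]
      exact ih (fun x hx => h x (List.mem_cons_of_mem _ hx)) _ (le_trans hinit (le_max_left _ _))

-- A's inner movements_per_dest loop for one destination, in closed form
lemma mpd_inner (dest : String) (vbs : List (Int × (Int × String) × (Int × String)))
    (d : PySem.Dict String Int) :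
    vbs.foldl (aMpdStep dest) d
      = if (vbs.countP (fun m => decide (m.2.1.2 ≠ dest)) : Int) = 0 then d
        else d.insert dest (d.getD dest 0 + (vbs.countP (fun m => decide (m.2.1.2 ≠ dest)) : Int)) := by
  induction vbs generalizing d with
  | nil => simp
  | cons x rest ih =>
    rw [List.foldl_cons]
    have hstep : aMpdStep dest d x
        = if x.2.1.2 ≠ dest then d.insert dest (d.getD dest 0 + 1) else d := rfl
    rw [hstep]
    by_cases h : x.2.1.2 ≠ dest
    · have hcnt : (x :: rest).countP (fun m => decide (m.2.1.2 ≠ dest))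
          = rest.countP (fun m => decide (m.2.1.2 ≠ dest)) + 1 := by
        simp [h]
      rw [if_pos h, ih, hcnt]
      by_cases hr : (rest.countP (fun m => decide (m.2.1.2 ≠ dest)) : Int) = 0
      · have hr' : rest.countP (fun m => decide (m.2.1.2 ≠ dest)) = 0 := by exact_mod_cast hr
        rw [if_pos hr, if_neg (by push_cast; omega), hr']
        norm_num
      · rw [if_neg hr, if_neg (by push_cast at hr ⊢; omega),
          PySem.Dict.insert_insert_self, PySem.Dict.getD_insert_self]
        congr 1
        push_cast
        ring
    · have hcnt : (x :: rest).countP (fun m => decide (m.2.1.2 ≠ dest))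
          = rest.countP (fun m => decide (m.2.1.2 ≠ dest)) := by
        simp [h]
      rw [if_neg h, ih, hcnt]

-- the two movements_per_dest folds agree on fresh, duplicate-free destination keys
lemma mpd_eq (movs : List (String × List (Int × (Int × String) × (Int × String))))
    (d : PySem.Dict String Int)
    (hnd : (movs.map (·.1)).Nodup)
    (hfresh : ∀ dv ∈ movs, d.contains dv.1 = false) :
    movs.foldl (fun d dv => dv.2.foldl (aMpdStep dv.1) d) d
      = movs.foldl (fun d dv =>
          if (dv.2.countP (fun m => decide (m.2.1.2 ≠ dv.1)) : Int) ≠ 0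
          then d.insert dv.1 (dv.2.countP (fun m => decide (m.2.1.2 ≠ dv.1)) : Int) else d) d := by
  induction movs generalizing d with
  | nil => rfl
  | cons dv rest ih =>
    simp only [List.map_cons, List.nodup_cons] at hnd
    simp only [List.foldl_cons]
    have hfd : d.contains dv.1 = false := hfresh dv (List.mem_cons_self ..)
    have hgd : d.getD dv.1 0 = 0 := PySem.Dict.getD_of_not_contains d 0 hfd
    rw [mpd_inner, hgd]
    by_cases hc : (dv.2.countP (fun m => decide (m.2.1.2 ≠ dv.1)) : Int) = 0
    · rw [if_pos hc, if_neg (by simpa using hc)]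
      exact ih d hnd.2 (fun x hx => hfresh x (List.mem_cons_of_mem _ hx))
    · rw [if_neg hc, if_pos hc, zero_add]
      apply ih _ hnd.2
      intro x hx
      rw [PySem.Dict.contains_insert]
      have hne : x.1 ≠ dv.1 := by
        intro he
        apply hnd.1
        have := List.mem_map_of_mem (f := fun y => y.1) hx
        simpa [he] using this
      simp [hne, hfresh x (List.mem_cons_of_mem _ hx)]

-- ===== VERDICT (by name: the statement is the Claim_ definition above) =====
theorem estimate_concurrency_spec : Claim_equal_estimate_concurrency := by
  intro movements _ hpre
  obtain ⟨hnd, _⟩ := hpre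
  unfold Spec_estimate_concurrency estimate_concurrency estimate_concurrency_alt
  rw [phase1_split]
  simp only [bDest]
  rw [PySem.List.foldl_prod_mk
    (f := fun (c : PySem.Dict String Int) (dv : String × List (Int × (Int × String) × (Int × String))) =>
      c.insert dv.1 (dv.2.foldl (bMaxStep dv.1 (dv.2.foldl (bGroupStep dv.1) (PySem.Dict.empty, 0)).1) 0))
    (g := fun (d : PySem.Dict String Int) (dv : String × List (Int × (Int × String) × (Int × String))) =>
      if (dv.2.foldl (bGroupStep dv.1) (PySem.Dict.empty, 0)).2 ≠ 0
      then d.insert dv.1 (dv.2.foldl (bGroupStep dv.1) (PySem.Dict.empty, 0)).2 else d)]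
  refine Prod.ext ?_ ?_ <;> simp only
  · -- concurrency_per_dest
    congr 1
    apply PySem.List.foldl_congr_mem
    intro cpd dv hdv
    congr 1
    have hT : (movements.foldl (fun t dv => dv.2.foldl (aTimStep dv.1) t)
        PySem.Dict.empty).getD dv.1 [] = dv.2.map aTup := by
      rw [timings_getD, filter_key_of_nodup movements dv.1 dv.2 hnd (by rwa [Prod.mk.eta])]
      simp
    rw [hT, group_split]
    apply max_fold_eq dv.1 dv.2 _
      (fun m => bConc m
        ((dv.2.foldl (fun g m => if m.2.1.2 ≠ dv.1 then g.modify m.2.1.2 [] (· ++ [bTup m]) else g)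
          PySem.Dict.empty).getD m.2.1.2 [])) _ 0 le_rfl
    intro m _
    rw [conc_eq]
    simp only [group_getD]
  · -- movements_per_dest
    congr 1
    rw [mpd_eq movements PySem.Dict.empty hnd (fun dv _ => PySem.Dict.contains_empty dv.1)]
    apply PySem.List.foldl_congr_mem
    intro d dv _
    rw [group_split]
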